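-- pv_equiv track=rewrite | github.com/dgrifka/baseball_game_simulator | game_simulator.py | advance_runner
-- ===== SOURCE A (Python) =====
-- def advance_runner(bases, count=1):
--     runs = 0
--     for _ in range(count):
--         if bases[2]:
--             runs += 1
--         bases[2] = bases[1]
--         bases[1] = bases[0]
--         bases[0] = True
--     return runs
-- ===== SOURCE B (Python) =====
-- def advance_runner(bases, count=1):
--     # Closed form: no loop over count. Mutates `bases` in place like the original.
--     if count <= 0:
--         return 0
--     runs = max(0, count - 3)
--     if bases[2]:
--         runs += 1
--     if count >= 2 and bases[1]:
--         runs += 1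
--     if count >= 3 and bases[0]:
--         runs += 1
--     for j in (2, 1, 0):
--         bases[j] = True if count >= j + 1 else bases[j - count]
--     return runs
-- ===== Notes on version B (the rewrite author's own statement) =====
-- stated objective: alternative
-- what changed: Replaces the per-base-advance loop (count iterations of shifting the three bases) with a closed-form computation of runs and a direct in-place assignment of the final base state; O(1) in count rather than O(count).
-- outside the precondition, e.g. on advance_runner([], 1): A raises IndexError, B raises IndexError
import Mathlib
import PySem

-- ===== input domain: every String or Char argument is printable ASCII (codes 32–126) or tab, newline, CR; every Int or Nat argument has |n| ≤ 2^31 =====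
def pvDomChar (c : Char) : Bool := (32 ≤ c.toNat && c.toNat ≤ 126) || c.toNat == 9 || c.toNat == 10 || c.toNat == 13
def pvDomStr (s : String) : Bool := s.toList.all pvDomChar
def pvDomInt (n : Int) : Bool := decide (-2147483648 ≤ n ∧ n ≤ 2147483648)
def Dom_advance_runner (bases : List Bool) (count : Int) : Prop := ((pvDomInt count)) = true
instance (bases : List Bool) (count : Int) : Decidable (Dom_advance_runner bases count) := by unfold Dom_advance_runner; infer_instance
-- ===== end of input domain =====

-- B replaces A's count-iteration shift loop by a closed-form run count; equivalence is about
-- the RETURN value only (both Pythons mutate `bases` in place identically; the ports do not).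

-- ===== PORT A =====
-- A's loop: each of count iterations scores bases[2] and shifts [b0,b1,b2] -> [True,b0,b1].
-- Under Pre_ the list has length ≥ 3 whenever the loop runs, so getD equals Python indexing.
def advance_runner_loop : Nat → List Bool → Int → Int
  | 0, _, runs => runs
  | n + 1, bs, runs =>
      advance_runner_loop n
        ([true, bs.getD 0 false, bs.getD 1 false] ++ bs.drop 3)
        (runs + (if bs.getD 2 false then 1 else 0))

def advance_runner (bases : List Bool) (count : Int) : Int :=
  advance_runner_loop count.toNat bases 0

-- ===== PORT B =====
def advance_runner_alt (bases : List Bool) (count : Int) : Int :=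
  if count ≤ 0 then 0
  else
    let r0 := max 0 (count - 3)
    let r1 := if bases.getD 2 false then r0 + 1 else r0
    let r2 := if 2 ≤ count ∧ bases.getD 1 false then r1 + 1 else r1
    if 3 ≤ count ∧ bases.getD 0 false then r2 + 1 else r2

-- ===== PRECONDITION & SPEC =====
-- Pre_ excludes inputs on which Python A raises IndexError: a positive count with fewer than 3 bases.
def Pre_advance_runner (bases : List Bool) (count : Int) : Prop :=
  count ≤ 0 ∨ 3 ≤ bases.length
instance (bases : List Bool) (count : Int) : Decidable (Pre_advance_runner bases count) := by
  unfold Pre_advance_runner; infer_instance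

def pvWitness_advance_runner : List Bool × Int := ([true, false, true], 2)

def Spec_advance_runner (bases : List Bool) (count : Int) (out : Int) : Prop := out = advance_runner_alt bases count
instance (bases : List Bool) (count : Int) (out : Int) : Decidable (Spec_advance_runner bases count out) := by unfold Spec_advance_runner; infer_instance

-- ===== CLAIM (what is proved, stated in full; the proofs are below) =====
def Claim_equal_advance_runner : Prop := ∀ (bases : List Bool) (count : Int), Dom_advance_runner bases count → Pre_advance_runner bases count → Spec_advance_runner bases count (advance_runner bases count)

-- ===== LEMMAS AND PROOFS =====

-- Closed form of the loop's contribution for n iterations.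
def runsClosed (n : Nat) (bs : List Bool) : Int :=
  max 0 ((n : Int) - 3)
    + (if 1 ≤ n ∧ bs.getD 2 false then 1 else 0)
    + (if 2 ≤ n ∧ bs.getD 1 false then 1 else 0)
    + (if 3 ≤ n ∧ bs.getD 0 false then 1 else 0)

theorem loop_eq_closed (n : Nat) (bs : List Bool) (r : Int) :
    advance_runner_loop n bs r = r + runsClosed n bs := by
  induction n generalizing bs r with
  | zero => simp [advance_runner_loop, runsClosed]
  | succ n ih =>
      rw [advance_runner_loop, ih]
      simp [runsClosed]
      split_ifs <;> push_cast <;> omega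

theorem advance_runner_spec : Claim_equal_advance_runner := by
  intro bases count _ _
  show advance_runner bases count = advance_runner_alt bases count
  rw [advance_runner, loop_eq_closed]
  by_cases hc : count ≤ 0
  · have h0 : count.toNat = 0 := Int.toNat_of_nonpos hc
    simp [h0, runsClosed, advance_runner_alt, hc]
  · have hcast : (count.toNat : Int) = count := Int.toNat_of_nonneg (le_of_not_ge hc)
    have h1 : 1 ≤ count.toNat := by omega
    have h2 : (2 ≤ count.toNat) ↔ (2 ≤ count) := by omega
    have h3 : (3 ≤ count.toNat) ↔ (3 ≤ count) := by omega
    simp [runsClosed, advance_runner_alt, hc, hcast, h1, h2, h3]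
    split_ifs <;> omega
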